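-- pv_equiv track=rewrite | github.com/ajayk108/python | fun_pract.py | summer_of_69
-- ===== SOURCE A (Python) =====
-- def summer_of_69(arr):
--     total = 0
--     add = True
--     for num in arr:
--         while add:
--             if num != 6:
--                 total += num
--                 break
--             else:
--                 add = False
--                 break
--         while not add:
--             if num != 9:
--                 break
--             else:
--                 add = True
--                 break
--     return total
-- ===== SOURCE B (Python) =====
-- def summer_of_69(arr):
--     arr = list(arr)
--     i = 0
--     total = 0
--     while i < len(arr):
--         if arr[i] == 6:
--             while i < len(arr) and arr[i] != 9:
--                 i += 1
--             i += 1
--         else: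
--             total += arr[i]
--             i += 1
--     return total
-- ===== Notes on version B (the rewrite author's own statement) =====
-- stated objective: alternative
-- what changed: Replaces the per-element toggle-flag scan with an index-based segment-skipping loop: on a 6 an inner while advances past the section up to and including the next 9, so no boolean mode is carried element by element.
import Mathlib
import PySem

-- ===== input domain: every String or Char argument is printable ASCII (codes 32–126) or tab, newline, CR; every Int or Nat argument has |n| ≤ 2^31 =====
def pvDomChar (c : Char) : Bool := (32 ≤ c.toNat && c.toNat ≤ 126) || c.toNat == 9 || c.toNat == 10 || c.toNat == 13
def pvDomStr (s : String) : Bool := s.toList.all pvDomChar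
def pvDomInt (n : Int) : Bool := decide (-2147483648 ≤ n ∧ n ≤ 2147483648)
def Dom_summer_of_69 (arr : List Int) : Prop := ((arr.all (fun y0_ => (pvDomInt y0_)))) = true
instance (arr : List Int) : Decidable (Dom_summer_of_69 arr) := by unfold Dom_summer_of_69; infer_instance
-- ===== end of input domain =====

-- B replaces A's per-element toggle-flag scan by an index-based segment-skipping loop (alternative decomposition, same cost).


-- ===== PORT A =====
-- One loop iteration of A: the two degenerate 'while … break' blocks are single-shot conditionals.
def summer_of_69_step (st : Int × Bool) (num : Int) : Int × Bool :=
  let st1 :=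
    if st.2 then
      (if num ≠ 6 then (st.1 + num, st.2) else (st.1, false))
    else st
  if ¬ st1.2 then
    (if num ≠ 9 then st1 else (st1.1, true))
  else st1

def summer_of_69 (arr : List Int) : Int :=
  (arr.foldl summer_of_69_step (0, true)).1

-- ===== PORT B =====
-- inner while: advance i while arr[i] != 9, then the extra i += 1 skips the 9 itself
def summer_of_69_skip : List Int → List Int
  | [] => []
  | x :: xs => if x = 9 then xs else summer_of_69_skip xs

theorem summer_of_69_skip_len_le : ∀ (l : List Int), (summer_of_69_skip l).length ≤ l.length := by
  intro l
  induction l with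
  | nil => simp [summer_of_69_skip]
  | cons x xs ih =>
    simp only [summer_of_69_skip]
    split
    · simp
    · exact Nat.le_succ_of_le ih

-- outer while over the remaining suffix of arr, carrying total
def summer_of_69_go : List Int → Int → Int
  | [], total => total
  | x :: xs, total =>
    if x = 6 then summer_of_69_go (summer_of_69_skip xs) total
    else summer_of_69_go xs (total + x)
termination_by l _ => l.length
decreasing_by
  · exact Nat.lt_succ_of_le (summer_of_69_skip_len_le xs)
  · simp

def summer_of_69_alt (arr : List Int) : Int :=
  summer_of_69_go arr 0

-- ===== PRECONDITION & SPEC =====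
def Spec_summer_of_69 (arr : List Int) (out : Int) : Prop := out = summer_of_69_alt arr
instance (arr : List Int) (out : Int) : Decidable (Spec_summer_of_69 arr out) := by unfold Spec_summer_of_69; infer_instance

-- ===== CLAIM (what is proved, stated in full; the proofs are below) =====
def Claim_equal_summer_of_69 : Prop := ∀ (arr : List Int), Dom_summer_of_69 arr → Spec_summer_of_69 arr (summer_of_69 arr)

-- ===== LEMMAS AND PROOFS =====

-- skip mode of A ≡ B's drop-past-the-next-9
theorem foldA_false_eq_skip : ∀ (l : List Int) (t : Int),
    (l.foldl summer_of_69_step (t, false)).1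
      = ((summer_of_69_skip l).foldl summer_of_69_step (t, true)).1 := by
  intro l
  induction l with
  | nil => intro t; simp [summer_of_69_skip]
  | cons x xs ih =>
    intro t
    by_cases h : x = 9
    · simp [List.foldl, summer_of_69_step, summer_of_69_skip, h]
    · simp [List.foldl, summer_of_69_step, summer_of_69_skip, h, ih t]

theorem go_eq_foldA : ∀ (l : List Int) (t : Int),
    summer_of_69_go l t = (l.foldl summer_of_69_step (t, true)).1 := by
  intro l t
  induction l, t using summer_of_69_go.induct with
  | case1 t => simp [summer_of_69_go]
  | case2 xs t ih =>
    have hstep : summer_of_69_step (t, true) 6 = (t, false) := by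
      simp [summer_of_69_step]
    simp only [summer_of_69_go, List.foldl, hstep, if_true]
    rw [ih, foldA_false_eq_skip]
  | case3 x xs t h ih =>
    have hstep : summer_of_69_step (t, true) x = (t + x, true) := by
      simp [summer_of_69_step, h]
    simp only [summer_of_69_go, if_neg h, List.foldl, hstep]
    exact ih

-- ===== VERDICT (by name: the statement is the Claim_ definition above) =====
theorem summer_of_69_spec : Claim_equal_summer_of_69 := by
  intro arr _
  unfold Spec_summer_of_69 summer_of_69 summer_of_69_alt
  exact (go_eq_foldA arr 0).symm
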